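-- pv_equiv track=rewrite | github.com/pranav-joshi-iitgn/ProjectEuler | Prob51.py | generateFam
-- ===== SOURCE A (Python) =====
-- def generateFam(x):
--     L = [str(x)]
--     l = len(str(x))
--     for j in range(l-1):
--         n = len(L)
--         for i in range(n):
--             s = L[i]
--             s = s[:j] + '*' + s[j+1:]
--             L.append(s)
--     return L
-- ===== SOURCE B (Python) =====
-- def generateFam(x):
--     s0 = str(x)
--     l = len(s0)
--     out = []
--     for i in range(2 ** (l - 1)):
--         cs = list(s0)
--         for k in range(l - 1):
--             if (i >> k) & 1:
--                 cs[k] = '*'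
--         out.append(''.join(cs))
--     return out
-- ===== Notes on version B (the rewrite author's own statement) =====
-- stated objective: alternative
-- what changed: Replaces A's incremental list-doubling (snapshot length, re-star every previous entry per position) with direct bitmask enumeration: element i is built independently from str(x) by starring exactly the positions named by the set bits of i.
import Mathlib
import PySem

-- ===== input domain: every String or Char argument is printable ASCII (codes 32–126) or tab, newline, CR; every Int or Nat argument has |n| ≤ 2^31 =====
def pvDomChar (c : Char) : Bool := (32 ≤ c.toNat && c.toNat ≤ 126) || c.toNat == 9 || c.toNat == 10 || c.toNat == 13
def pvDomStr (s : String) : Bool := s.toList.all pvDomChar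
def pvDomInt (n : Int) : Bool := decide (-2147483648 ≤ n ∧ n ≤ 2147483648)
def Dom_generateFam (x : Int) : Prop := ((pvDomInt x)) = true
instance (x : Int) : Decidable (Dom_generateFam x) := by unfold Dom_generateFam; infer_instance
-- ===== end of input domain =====

-- B replaces A's incremental list-doubling with independent bitmask construction of each string; alternative decomposition, same cost.


-- ===== PORT A =====
-- s[:j] + '*' + s[j+1:] on a char list (exact: j ≥ 0 here, so the slices are take/drop)
def starAt (j : Nat) (s : List Char) : List Char := s.take j ++ '*' :: s.drop (j + 1)

-- Strings are carried as char lists and packed with String.ofList at the end (PySem convention).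
-- The inner 'for i in range(n): L.append(star(L[i]))' appends star j of each of the n snapshot
-- entries in order, i.e. L ++ L.map (starAt j).
def generateFam (x : Int) : List String :=
  let s0 := PySem.Int.toChars x
  let l := s0.length
  ((List.range (l - 1)).foldl (fun L j => L ++ L.map (starAt j)) [s0]).map String.ofList

-- ===== PORT B =====
-- cs with cs[k] = '*' for every set bit k of i among positions 0..l-2
def altRow (s0 : List Char) (m : Nat) (i : Nat) : List Char :=
  (List.range m).foldl (fun cs k => if (i >>> k) % 2 = 1 then cs.set k '*' else cs) s0

def generateFam_alt (x : Int) : List String :=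
  let s0 := PySem.Int.toChars x
  (List.range (2 ^ (s0.length - 1))).map (fun i => String.ofList (altRow s0 (s0.length - 1) i))

-- ===== PRECONDITION & SPEC =====
def Spec_generateFam (x : Int) (out : List String) : Prop := out = generateFam_alt x
instance (x : Int) (out : List String) : Decidable (Spec_generateFam x out) := by unfold Spec_generateFam; infer_instance

-- ===== CLAIM (what is proved, stated in full; the proofs are below) =====
def Claim_equal_generateFam : Prop := ∀ (x : Int), Dom_generateFam x → Spec_generateFam x (generateFam x)

-- ===== LEMMAS AND PROOFS =====

lemma altRow_length (s0 : List Char) (m i : Nat) : (altRow s0 m i).length = s0.length := by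
  unfold altRow
  induction m with
  | zero => rfl
  | succ m ih =>
    rw [List.range_succ, List.foldl_append, List.foldl_cons, List.foldl_nil]
    split <;> simp [ih]

lemma altRow_succ (s0 : List Char) (m i : Nat) :
    altRow s0 (m + 1) i =
      (if (i >>> m) % 2 = 1 then (altRow s0 m i).set m '*' else altRow s0 m i) := by
  unfold altRow
  rw [List.range_succ, List.foldl_append, List.foldl_cons, List.foldl_nil]

lemma altRow_succ_low (s0 : List Char) (m i : Nat) (hi : i < 2 ^ m) :
    altRow s0 (m + 1) i = altRow s0 m i := by
  rw [altRow_succ]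
  have : i >>> m = 0 := by
    rw [Nat.shiftRight_eq_div_pow]
    exact Nat.div_eq_of_lt hi
  simp [this]

lemma shift_add_pow (m k i : Nat) (hk : k < m) :
    ((2 ^ m + i) >>> k) % 2 = (i >>> k) % 2 := by
  rw [Nat.shiftRight_eq_div_pow, Nat.shiftRight_eq_div_pow]
  have hdvd : 2 ^ k ∣ 2 ^ m := pow_dvd_pow 2 hk.le
  rw [Nat.add_div_of_dvd_right hdvd, Nat.pow_div hk.le (by norm_num)]
  have h2 : (2 : Nat) ∣ 2 ^ (m - k) := dvd_pow_self 2 (by omega)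
  omega

lemma altRow_succ_high (s0 : List Char) (m i : Nat) (hi : i < 2 ^ m) :
    altRow s0 (m + 1) (2 ^ m + i) = (altRow s0 m i).set m '*' := by
  have hbit : ((2 ^ m + i) >>> m) % 2 = 1 := by
    rw [Nat.shiftRight_eq_div_pow, Nat.add_comm, Nat.add_div_right _ (Nat.two_pow_pos m),
      Nat.div_eq_of_lt hi]
  have hlow : altRow s0 m (2 ^ m + i) = altRow s0 m i := by
    unfold altRow
    apply PySem.List.foldl_congr_mem
    intro cs k hk
    rw [List.mem_range] at hk
    rw [shift_add_pow m k i hk]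
  rw [altRow_succ, hbit, hlow]
  simp

lemma starAt_eq_set (s : List Char) (m : Nat) (hm : m < s.length) :
    starAt m s = s.set m '*' := by
  unfold starAt
  rw [List.set_eq_take_append_cons_drop, if_pos hm]

lemma loop_eq (s0 : List Char) (m : Nat) (hm : m ≤ s0.length - 1) :
    (List.range m).foldl (fun L j => L ++ L.map (starAt j)) [s0]
      = (List.range (2 ^ m)).map (altRow s0 m) := by
  induction m with
  | zero => simp [altRow]
  | succ m ih =>
    have hm' : m ≤ s0.length - 1 := by omega
    have hms : m < s0.length := by omega
    rw [List.range_succ, List.foldl_append, List.foldl_cons, List.foldl_nil, ih hm']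
    have h1 : ((List.range (2 ^ m)).map (altRow s0 m)).map (starAt m)
        = (List.range (2 ^ m)).map (fun i => altRow s0 (m + 1) (2 ^ m + i)) := by
      rw [List.map_map]
      apply List.map_congr_left
      intro i hi
      rw [List.mem_range] at hi
      rw [altRow_succ_high s0 m i hi, Function.comp_apply,
        starAt_eq_set _ m (by rw [altRow_length]; omega)]
    have h2 : (List.range (2 ^ m)).map (altRow s0 m)
        = (List.range (2 ^ m)).map (altRow s0 (m + 1)) := by
      apply List.map_congr_left
      intro i hi
      rw [List.mem_range] at hi
      rw [altRow_succ_low s0 m i hi]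
    rw [h1, h2, pow_succ, Nat.mul_two, List.range_add, List.map_append, List.map_map]
    rfl

-- ===== VERDICT (by name: the statement is the Claim_ definition above) =====
theorem generateFam_spec : Claim_equal_generateFam := by
  intro x _
  unfold Spec_generateFam generateFam generateFam_alt
  simp only
  rw [loop_eq _ _ le_rfl, List.map_map]
  rfl
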